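-- pv_equiv track=rewrite | github.com/Brandtweary/Cymbiont | src/knowledge_graph/text_parser.py | enforce_max_chunk_size
-- ===== SOURCE A (Python) =====
-- from typing import List, Optional
--
-- def enforce_max_chunk_size(paragraphs: List[str], max_words: int = 1500) -> List[str]:
--     """Split any chunks that exceed max_words as a last resort."""
--     result: List[str] = []
--
--     for para in paragraphs:
--         words = para.split()
--
--         # If paragraph is within limit, keep as is
--         if len(words) <= max_words:
--             result.append(para)
--             continue
--
--         # Otherwise split into chunks of max_words
--         current_pos = 0
--         while current_pos < len(words):
--             # Get next chunk of words
--             chunk_words = words[current_pos:current_pos + max_words]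
--
--             # Create chunk text
--             chunk_text = ' '.join(chunk_words)
--
--             # Add ellipsis at start if not first chunk
--             if current_pos > 0:
--                 chunk_text = '...' + chunk_text
--
--             # Add ellipsis at end if not last chunk
--             if current_pos + max_words < len(words):
--                 chunk_text = chunk_text + '...'
--
--             result.append(chunk_text)
--             current_pos += max_words
--
--     return result
-- ===== SOURCE B (Python) =====
-- def enforce_max_chunk_size(paragraphs, max_words=1500):
--     """Split any chunks that exceed max_words as a last resort."""
--     result = []
--     for para in paragraphs:
--         words = para.split()
--         if len(words) <= max_words:
--             result.append(para)
--             continue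
--         # Pass 1: one left-to-right sweep over the words, flushing a chunk
--         # each time the running buffer reaches max_words (no slicing/index math).
--         chunks = []
--         buf = []
--         for w in words:
--             buf.append(w)
--             if len(buf) == max_words:
--                 chunks.append(' '.join(buf))
--                 buf = []
--         if buf:
--             chunks.append(' '.join(buf))
--         # Pass 2: decorate chunks with ellipses based on their position.
--         last = len(chunks) - 1
--         for i, chunk in enumerate(chunks):
--             result.append(('...' if i > 0 else '') + chunk + ('...' if i < last else ''))
--     return result
-- ===== Notes on version B (the rewrite author's own statement) =====
-- stated objective: alternative
-- what changed: B replaces A's positional while-loop (slicing words[pos:pos+max_words] and deciding both ellipses inline from pos arithmetic) by two staged passes: a single accumulator sweep over the words that flushes a buffer each time it reaches max_words (no slicing or position arithmetic), followed by a separate decoration pass over the finished chunk list that adds ellipses from each chunk's index and the total count.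
-- outside the precondition, e.g. on enforce_max_chunk_size([''], 0): A returns [''], B returns ['']
import Mathlib
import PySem

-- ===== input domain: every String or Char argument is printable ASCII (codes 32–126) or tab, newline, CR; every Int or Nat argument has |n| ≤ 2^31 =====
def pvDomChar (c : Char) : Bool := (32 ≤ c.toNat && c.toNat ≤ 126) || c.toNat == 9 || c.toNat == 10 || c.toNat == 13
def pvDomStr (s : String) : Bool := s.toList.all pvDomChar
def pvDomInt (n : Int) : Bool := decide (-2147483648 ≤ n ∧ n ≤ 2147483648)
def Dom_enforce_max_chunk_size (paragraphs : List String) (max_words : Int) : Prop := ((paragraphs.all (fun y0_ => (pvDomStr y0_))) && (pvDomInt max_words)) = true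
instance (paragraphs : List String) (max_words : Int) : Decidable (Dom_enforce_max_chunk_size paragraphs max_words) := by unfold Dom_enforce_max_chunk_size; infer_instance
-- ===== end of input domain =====

-- B restructures A: instead of A's positional while-loop slicing words[pos:pos+max_words] and
-- deciding both ellipses inline from pos, B makes one buffer-flush sweep over the words and then
-- a separate decoration pass over the finished chunk list (objective: alternative).

-- ===== PORT A =====
-- the 'while current_pos < len(words)' loop; fuel bounds the iteration count (Pre_ guarantees it suffices)
def pvChunkLoopA (words : List String) (max_words : Int) : Nat → Int → List String → List String
  | 0, _, result => result
  | fuel + 1, current_pos, result =>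
    if current_pos < (words.length : Int) then
      let chunk_words := PySem.List.slice words (some current_pos) (some (current_pos + max_words))
      let chunk_text := PySem.Str.join " " chunk_words
      let chunk_text := if 0 < current_pos then "..." ++ chunk_text else chunk_text
      let chunk_text := if current_pos + max_words < (words.length : Int) then chunk_text ++ "..." else chunk_text
      pvChunkLoopA words max_words fuel (current_pos + max_words) (result ++ [chunk_text])
    else result

def enforce_max_chunk_size (paragraphs : List String) (max_words : Int) : List String :=
  paragraphs.foldl (fun result para =>
    let words := PySem.Str.split₀ para
    if (words.length : Int) ≤ max_words then result ++ [para]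
    else pvChunkLoopA words max_words words.length 0 result) []

-- ===== PORT B =====
-- pass 1: 'for w in words: buf.append(w); if len(buf) == max_words: flush the buffer into chunks'
def pvCollect (max_words : Int) (words : List String) : List String × List String :=
  words.foldl (fun st w =>
    let buf := st.2 ++ [w]
    if (buf.length : Int) = max_words then (st.1 ++ [PySem.Str.join " " buf], [])
    else (st.1, buf)) ([], [])

def enforce_max_chunk_size_alt (paragraphs : List String) (max_words : Int) : List String :=
  paragraphs.foldl (fun result para =>
    let words := PySem.Str.split₀ para
    if (words.length : Int) ≤ max_words then result ++ [para]
    else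
      let st := pvCollect max_words words
      let chunks := if st.2 ≠ [] then st.1 ++ [PySem.Str.join " " st.2] else st.1
      let last : Int := (chunks.length : Int) - 1
      (PySem.List.enumerate chunks 0).foldl (fun res ic =>
        res ++ [(if 0 < ic.1 then "..." else "") ++ ic.2 ++ (if ic.1 < last then "..." else "")]) result) []

-- ===== PRECONDITION & SPEC =====
-- Pre_ excludes non-positive max_words: there A loops forever on any paragraph that contains a word;
-- on the degenerate excluded inputs where A still returns (every paragraph splits to no words)
-- both programs happen to agree, see the cite.
def Pre_enforce_max_chunk_size (paragraphs : List String) (max_words : Int) : Prop := 1 ≤ max_words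
instance (paragraphs : List String) (max_words : Int) : Decidable (Pre_enforce_max_chunk_size paragraphs max_words) := by unfold Pre_enforce_max_chunk_size; infer_instance
def pvWitness_enforce_max_chunk_size : List String × Int := (["a b c d e", "hi"], 2)

def Spec_enforce_max_chunk_size (paragraphs : List String) (max_words : Int) (out : List String) : Prop := out = enforce_max_chunk_size_alt paragraphs max_words
instance (paragraphs : List String) (max_words : Int) (out : List String) : Decidable (Spec_enforce_max_chunk_size paragraphs max_words out) := by unfold Spec_enforce_max_chunk_size; infer_instance

-- ===== CLAIM (what is proved, stated in full; the proofs are below) =====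
def Claim_equal_enforce_max_chunk_size : Prop := ∀ (paragraphs : List String) (max_words : Int), Dom_enforce_max_chunk_size paragraphs max_words → Pre_enforce_max_chunk_size paragraphs max_words → Spec_enforce_max_chunk_size paragraphs max_words (enforce_max_chunk_size paragraphs max_words)

-- ===== LEMMAS AND PROOFS =====

-- the common slice-indexed specification both per-paragraph computations are reduced to
def pvSliceSpec (mw : Int) (para : String) : List String :=
  let words := PySem.Str.split₀ para
  if (words.length : Int) ≤ mw then [para]
  else
    let n : Int := -(PySem.Int.floordiv (-(words.length : Int)) mw)
    (PySem.List.pyRange 0 n 1).map (fun i =>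
      (if 0 < i then "..." else "")
        ++ PySem.Str.join " " (PySem.List.slice words (some (i * mw)) (some ((i + 1) * mw)))
        ++ (if i < n - 1 then "..." else ""))

-- the ceiling bracket: n = ⌈L/mw⌉ characterised by (n-1)*mw < L ≤ n*mw
theorem pv_ceil_bracket (L mw : Int) (hmw : 1 ≤ mw) :
    (-(PySem.Int.floordiv (-L) mw) - 1) * mw < L ∧ L ≤ -(PySem.Int.floordiv (-L) mw) * mw :=
  (PySem.Int.neg_floordiv_neg_eq_iff_of_pos (by omega)).mp rfl

-- A's loop, started at position k*mw with enough fuel, produces the decorated chunks k..n-1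
theorem pvChunkLoopA_eq (words : List String) (mw : Int) (hmw : 1 ≤ mw)
    (n : Int) (hn : n = -(PySem.Int.floordiv (-((words.length : Int))) mw)) :
    ∀ (fuel : Nat) (k : Int) (acc : List String), 0 ≤ k → n ≤ k + fuel →
      pvChunkLoopA words mw fuel (k * mw) acc =
        acc ++ (PySem.List.pyRange k n 1).map (fun i =>
          (if 0 < i then "..." else "")
            ++ PySem.Str.join " " (PySem.List.slice words (some (i * mw)) (some ((i + 1) * mw)))
            ++ (if i < n - 1 then "..." else "")) := by
  obtain ⟨hlow, hhigh⟩ := pv_ceil_bracket (words.length : Int) mw hmw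
  rw [← hn] at hlow hhigh
  intro fuel
  induction fuel with
  | zero =>
    intro k acc hk hfuel
    rw [PySem.List.pyRange_one_eq_nil (by omega)]
    simp [pvChunkLoopA]
  | succ m ih =>
    intro k acc hk hfuel
    by_cases hkn : k < n
    · -- position k*mw is still inside the word list
      have hpos : k * mw < (words.length : Int) := by
        calc k * mw ≤ (n - 1) * mw := by
              apply mul_le_mul_of_nonneg_right (by omega) (by omega)
          _ < (words.length : Int) := hlow
      have hnext : (k + 1) * mw = k * mw + mw := by ring
      have hlast : k * mw + mw < (words.length : Int) ↔ k + 1 < n := by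
        constructor
        · intro h
          by_contra hc
          have hge : n ≤ k + 1 := by omega
          have : n * mw ≤ (k + 1) * mw := mul_le_mul_of_nonneg_right hge (by omega)
          omega
        · intro h
          calc k * mw + mw = (k + 1) * mw := by ring
            _ ≤ (n - 1) * mw := mul_le_mul_of_nonneg_right (by omega) (by omega)
            _ < (words.length : Int) := hlow
      have hzero : 0 < k * mw ↔ 0 < k := by
        constructor
        · intro h
          by_contra hc
          have hk0 : k = 0 := by omega
          rw [hk0] at h; simp at h
        · intro h
          have h1 : 1 ≤ k := by omega
          have := mul_le_mul_of_nonneg_right h1 (show (0:Int) ≤ mw by omega)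
          simpa using lt_of_lt_of_le (by omega : (0:Int) < 1 * mw) (by simpa using this)
      rw [PySem.List.pyRange_one_cons hkn]
      simp only [pvChunkLoopA, if_pos hpos, List.map_cons]
      rw [← hnext, ih (k + 1) _ (by omega) (by omega)]
      simp only [List.append_assoc, List.singleton_append]
      have hiff : k < n - 1 ↔ k + 1 < n := by omega
      congr 2
      rw [hnext]
      simp only [hlast, hzero]
      by_cases h0 : 0 < k <;> by_cases h1 : k + 1 < n <;>
        simp [h0, h1, hiff, String.append_assoc]
    · -- k ≥ n: the loop guard fails and the remaining range is empty
      have hge : n ≤ k := by omega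
      have hstop : ¬ k * mw < (words.length : Int) := by
        have : n * mw ≤ k * mw := mul_le_mul_of_nonneg_right hge (by omega)
        omega
      rw [PySem.List.pyRange_one_eq_nil hge]
      simp [pvChunkLoopA, hstop]

-- per paragraph, A's loop body extends the accumulator by exactly the slice spec
theorem pv_step_eq_A (mw : Int) (hmw : 1 ≤ mw) (result : List String) (para : String) :
    (let words := PySem.Str.split₀ para
     if (words.length : Int) ≤ mw then result ++ [para]
     else pvChunkLoopA words mw words.length 0 result) = result ++ pvSliceSpec mw para := by
  simp only [pvSliceSpec]
  by_cases h : ((PySem.Str.split₀ para).length : Int) ≤ mw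
  · simp [h]
  · simp only [h, if_false]
    set words := PySem.Str.split₀ para with hw
    set n : Int := -(PySem.Int.floordiv (-((words.length : Int))) mw) with hn
    have := pvChunkLoopA_eq words mw hmw n hn words.length 0 result (by omega) (by
      obtain ⟨hlow, hhigh⟩ := pv_ceil_bracket (words.length : Int) mw hmw
      rw [← hn] at hlow hhigh
      by_cases hnp : 1 ≤ n
      · have : (n - 1) * 1 ≤ (n - 1) * mw := by
          apply mul_le_mul_of_nonneg_left (by omega) (by omega)
        omega
      · omega)
    simpa using this

-- ----- B side: the buffer-flush fold and the decoration pass -----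

-- the full (size-m) groups of a word list, and the trailing partial group
def pvFullGroups (m : Nat) (t : List String) : List (List String) :=
  if h : 0 < m ∧ m ≤ t.length then t.take m :: pvFullGroups m (t.drop m) else []
termination_by t.length
decreasing_by simp [List.length_drop]; omega

def pvRemGroup (m : Nat) (t : List String) : List String :=
  if h : 0 < m ∧ m ≤ t.length then pvRemGroup m (t.drop m) else t
termination_by t.length
decreasing_by simp [List.length_drop]; omega

-- invariant of B's pass 1: flushed groups so far, plus the open buffer
theorem pvCollect_inv (m : Nat) (hm : 0 < m) (mw : Int) (hmw : mw = (m : Int)) :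
    ∀ (ws chunks cur : List String), cur.length < m →
      ws.foldl (fun st w =>
        let buf := st.2 ++ [w]
        if (buf.length : Int) = mw then (st.1 ++ [PySem.Str.join " " buf], ([] : List String))
        else (st.1, buf)) (chunks, cur)
      = (chunks ++ (pvFullGroups m (cur ++ ws)).map (PySem.Str.join " "), pvRemGroup m (cur ++ ws)) := by
  intro ws
  induction ws with
  | nil =>
    intro chunks cur hcur
    have hnot : ¬ (0 < m ∧ m ≤ cur.length) := by omega
    rw [List.foldl_nil, List.append_nil]
    rw [pvFullGroups, pvRemGroup]
    simp [hnot]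
  | cons w ws ih =>
    intro chunks cur hcur
    simp only [List.foldl_cons]
    by_cases hflush : (((cur ++ [w]).length : Nat) : Int) = mw
    · have hlen : (cur ++ [w]).length = m := by
        rw [hmw] at hflush; exact_mod_cast hflush
      rw [if_pos hflush]
      rw [ih (chunks ++ [PySem.Str.join " " (cur ++ [w])]) [] (by simpa using hm)]
      simp only [List.nil_append]
      have hsplit : cur ++ w :: ws = (cur ++ [w]) ++ ws := by simp
      have hcond : 0 < m ∧ m ≤ ((cur ++ [w]) ++ ws).length := by
        constructor
        · exact hm
        · rw [List.length_append, hlen]; omega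
      rw [hsplit]
      conv_rhs => rw [pvFullGroups, pvRemGroup]
      rw [dif_pos hcond, dif_pos hcond]
      rw [List.take_left' hlen, List.drop_left' hlen]
      simp
    · have hlen : (cur ++ [w]).length < m := by
        have hne : (cur ++ [w]).length ≠ m := by
          intro hc; apply hflush; rw [hmw]; exact_mod_cast hc
        simp only [List.length_append, List.length_cons, List.length_nil] at hne ⊢
        omega
      rw [if_neg hflush]
      rw [ih chunks (cur ++ [w]) hlen]
      simp

-- the flushed groups plus the final buffer are exactly the size-m slices by index
theorem pv_groups_range (m : Nat) (hm : 0 < m) :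
    ∀ (N : Nat) (t : List String), t.length < N →
      (pvFullGroups m t).map (PySem.Str.join " ")
        ++ (if pvRemGroup m t = [] then [] else [PySem.Str.join " " (pvRemGroup m t)])
      = (List.range ((t.length + m - 1) / m)).map
          (fun k => PySem.Str.join " " ((t.drop (k * m)).take m)) := by
  intro N
  induction N with
  | zero => intro t h; omega
  | succ N ih =>
    intro t hlt
    by_cases hc : m ≤ t.length
    · have hcond : 0 < m ∧ m ≤ t.length := ⟨hm, hc⟩
      rw [pvFullGroups, pvRemGroup, dif_pos hcond, dif_pos hcond]
      have hdlen : (t.drop m).length = t.length - m := by simp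
      have hrec := ih (t.drop m) (by simp; omega)
      have hnn : (t.length + m - 1) / m = ((t.drop m).length + m - 1) / m + 1 := by
        rw [hdlen]
        have h1 : t.length + m - 1 = (t.length - m + m - 1) + m := by omega
        rw [h1]
        exact Nat.add_div_right _ hm
      rw [hnn, List.range_succ_eq_map]
      rw [List.map_cons, List.map_cons, List.cons_append]
      congr 1
      · simp
      · rw [hrec, List.map_map]
        apply List.map_congr_left
        intro k _
        simp only [Function.comp_apply, List.drop_drop, Nat.succ_eq_add_one]
        congr 2
        ring_nf
    · have hnot : ¬ (0 < m ∧ m ≤ t.length) := by omega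
      rw [pvFullGroups, pvRemGroup, dif_neg hnot, dif_neg hnot]
      by_cases htnil : t = []
      · subst htnil
        simp
        omega
      · have hLpos : 0 < t.length := List.length_pos_iff.mpr htnil
        have hLlt : t.length < m := by omega
        have hone : (t.length + m - 1) / m = 1 :=
          Nat.div_eq_of_lt_le (by omega) (by omega)
        rw [hone]
        simp [htnil, List.take_of_length_le (le_of_lt hLlt)]

-- n as a Nat ceiling
theorem pv_ceil_toNat (L' m : Nat) (hm : 0 < m) (hL : 0 < L') :
    -(PySem.Int.floordiv (-(L' : Int)) (m : Int)) = (((L' + m - 1) / m : Nat) : Int) := by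
  rw [PySem.Int.neg_floordiv_neg_eq_iff_of_pos (by exact_mod_cast hm)]
  set nn := (L' + m - 1) / m with hnn
  have hmod := Nat.div_add_mod (L' + m - 1) m
  have hr : (L' + m - 1) % m < m := Nat.mod_lt _ hm
  set p := m * nn with hp
  have hge1 : 1 ≤ nn := by
    rw [hnn, Nat.le_div_iff_mul_le hm]; omega
  have hsub : (nn - 1) * m = p - m := by
    rw [hp, Nat.mul_comm m nn, Nat.sub_mul, Nat.one_mul]
  constructor
  · push_cast [← Nat.cast_pred (by omega : 0 < nn)]
    have : (nn - 1) * m < L' := by omega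
    exact_mod_cast this
  · have : L' ≤ nn * m := by
      have : nn * m = p := by rw [hp, Nat.mul_comm]
      omega
    exact_mod_cast this

-- per paragraph, B's body extends the accumulator by exactly the slice spec
theorem pv_step_eq_B (mw : Int) (hmw : 1 ≤ mw) (result : List String) (para : String) :
    (let words := PySem.Str.split₀ para
     if (words.length : Int) ≤ mw then result ++ [para]
     else
       let st := pvCollect mw words
       let chunks := if st.2 ≠ [] then st.1 ++ [PySem.Str.join " " st.2] else st.1
       let last : Int := (chunks.length : Int) - 1
       (PySem.List.enumerate chunks 0).foldl (fun res ic =>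
         res ++ [(if 0 < ic.1 then "..." else "") ++ ic.2 ++ (if ic.1 < last then "..." else "")]) result)
    = result ++ pvSliceSpec mw para := by
  simp only [pvSliceSpec]
  by_cases h : ((PySem.Str.split₀ para).length : Int) ≤ mw
  · simp [h]
  · simp only [h, if_false]
    set words := PySem.Str.split₀ para with hw
    obtain ⟨m, hmw'⟩ : ∃ m : Nat, mw = (m : Int) := ⟨mw.toNat, (Int.toNat_of_nonneg (by omega)).symm⟩
    have hm : 0 < m := by
      have : (0 : Int) < (m : Int) := by rw [← hmw']; omega
      exact_mod_cast this
    have hLpos : 0 < words.length := by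
      rcases Nat.eq_zero_or_pos words.length with h0 | h0
      · exact absurd (by rw [h0]; push_cast; omega) h
      · exact h0
    have hcol : pvCollect mw words
        = ((pvFullGroups m words).map (PySem.Str.join " "), pvRemGroup m words) := by
      unfold pvCollect
      simpa using pvCollect_inv m hm mw hmw' words [] [] (by simpa using hm)
    set nn : Nat := (words.length + m - 1) / m with hnn
    have hchunks : (if (pvCollect mw words).2 ≠ [] then
          (pvCollect mw words).1 ++ [PySem.Str.join " " (pvCollect mw words).2]
        else (pvCollect mw words).1)
        = (List.range nn).map (fun k => PySem.Str.join " " ((words.drop (k * m)).take m)) := by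
      rw [hcol, hnn]
      rw [← pv_groups_range m hm (words.length + 1) words (by omega)]
      by_cases hrem : pvRemGroup m words = []
      · simp [hrem]
      · simp [hrem]
    rw [hchunks]
    rw [PySem.List.foldl_append_singleton_eq_map]
    congr 1
    have hn : -(PySem.Int.floordiv (-((words.length : Int))) mw) = ((nn : Nat) : Int) := by
      rw [hmw', hnn]
      exact pv_ceil_toNat words.length m hm hLpos
    rw [hn, PySem.List.pyRange_one]
    simp only [Int.sub_zero, Int.toNat_natCast, List.map_map]
    apply List.ext_getElem
    · simp [PySem.List.length_enumerate]
    · intro i h1 h2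
      simp only [List.getElem_map, PySem.List.getElem_enumerate, List.getElem_range,
        Function.comp_apply, List.length_map, List.length_range, Int.zero_add]
      have hi : i < nn := by simpa using h2
      have hslice : PySem.List.slice words (some (((i : Nat) : Int) * mw))
            (some ((((i : Nat) : Int) + 1) * mw))
          = (words.drop (i * m)).take m := by
        have e1 : ((i : Nat) : Int) * mw = (((i * m : Nat)) : Int) := by
          rw [hmw']; push_cast; ring
        have e2 : (((i : Nat) : Int) + 1) * mw = (((i * m : Nat)) : Int) + ((m : Nat) : Int) := by
          rw [hmw']; push_cast; ring
        rw [e1, e2, PySem.List.slice_natCast_add]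
      rw [hslice]

theorem pv_main (paragraphs : List String) (mw : Int) (hmw : 1 ≤ mw) :
    enforce_max_chunk_size paragraphs mw = enforce_max_chunk_size_alt paragraphs mw := by
  unfold enforce_max_chunk_size enforce_max_chunk_size_alt
  have hfA : (fun (result : List String) (para : String) =>
      let words := PySem.Str.split₀ para
      if (words.length : Int) ≤ mw then result ++ [para]
      else pvChunkLoopA words mw words.length 0 result)
      = fun result para => result ++ pvSliceSpec mw para := by
    funext result para
    exact pv_step_eq_A mw hmw result para
  have hfB : (fun (result : List String) (para : String) =>
      let words := PySem.Str.split₀ para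
      if (words.length : Int) ≤ mw then result ++ [para]
      else
        let st := pvCollect mw words
        let chunks := if st.2 ≠ [] then st.1 ++ [PySem.Str.join " " st.2] else st.1
        let last : Int := (chunks.length : Int) - 1
        (PySem.List.enumerate chunks 0).foldl (fun res ic =>
          res ++ [(if 0 < ic.1 then "..." else "") ++ ic.2 ++ (if ic.1 < last then "..." else "")]) result)
      = fun result para => result ++ pvSliceSpec mw para := by
    funext result para
    exact pv_step_eq_B mw hmw result para
  rw [hfA, hfB]

-- ===== VERDICT (by name: the statement is the Claim_ definition above) =====
theorem enforce_max_chunk_size_spec : Claim_equal_enforce_max_chunk_size := by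
  intro paragraphs max_words _ hpre
  unfold Spec_enforce_max_chunk_size
  exact pv_main paragraphs max_words hpre
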